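-- pv_equiv track=rewrite | github.com/MelodyKnit/HoteLink | scripts/generate/seed_hotels_bulk_impl.py | pick_unique_hotel_name
-- ===== SOURCE A (Python) =====
-- def normalize_name(value: str) -> str:
--     return " ".join((value or "").strip().split())
--
-- def pick_unique_hotel_name(base_name: str, used_names: set[str], serial_fallback: int) -> str:
--     normalized_base = normalize_name(base_name)
--     candidate = normalized_base
--     if candidate and candidate.casefold() not in used_names:
--         used_names.add(candidate.casefold())
--         return candidate
--     candidate = f"{normalized_base}-{serial_fallback}"
--     if candidate.casefold() not in used_names:
--         used_names.add(candidate.casefold())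
--         return candidate
--     suffix = 2
--     while True:
--         candidate = f"{normalized_base}-{serial_fallback}-{suffix}"
--         if candidate.casefold() not in used_names:
--             used_names.add(candidate.casefold())
--             return candidate
--         suffix += 1
-- ===== SOURCE B (Python) =====
-- def pick_unique_hotel_name(base_name, used_names, serial_fallback):
--     base = " ".join((base_name or "").strip().split())
--     if base and base.casefold() not in used_names:
--         used_names.add(base.casefold())
--         return base
--     tag = f"{base}-{serial_fallback}"
--     if tag.casefold() not in used_names:
--         used_names.add(tag.casefold())
--         return tag
--     # Invert the search: instead of probing tag-2, tag-3, ... one by one against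
--     # used_names, scan used_names ONCE and collect the suffix numbers already
--     # taken for this tag (a name is a taken suffix k exactly when it equals
--     # prefix + canonical decimal of k), then pick the smallest free number >= 2
--     # by a gap scan over the sorted taken suffixes.
--     prefix = tag.casefold() + "-"
--     taken = set()
--     for name in used_names:
--         if name.startswith(prefix):
--             value = 0
--             for ch in name[len(prefix):]:
--                 value = value * 10 + ord(ch) - 48
--             if name == prefix + str(value):
--                 taken.add(value)
--     k = 2
--     for t in sorted(taken):
--         if t == k:
--             k += 1
--         elif t > k:
--             break
--     candidate = f"{tag}-{k}"
--     used_names.add(candidate.casefold())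
--     return candidate
-- ===== Notes on version B (the rewrite author's own statement) =====
-- stated objective: alternative
-- what changed: A probes candidate names tag-2, tag-3, ... one by one against the set until a free one appears; B inverts the search: it scans used_names once, parses out the suffix numbers already taken for this tag (exact canonical-decimal match), sorts them and finds the smallest free number >= 2 by a gap scan, so no candidate probing loop remains.
import Mathlib
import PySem

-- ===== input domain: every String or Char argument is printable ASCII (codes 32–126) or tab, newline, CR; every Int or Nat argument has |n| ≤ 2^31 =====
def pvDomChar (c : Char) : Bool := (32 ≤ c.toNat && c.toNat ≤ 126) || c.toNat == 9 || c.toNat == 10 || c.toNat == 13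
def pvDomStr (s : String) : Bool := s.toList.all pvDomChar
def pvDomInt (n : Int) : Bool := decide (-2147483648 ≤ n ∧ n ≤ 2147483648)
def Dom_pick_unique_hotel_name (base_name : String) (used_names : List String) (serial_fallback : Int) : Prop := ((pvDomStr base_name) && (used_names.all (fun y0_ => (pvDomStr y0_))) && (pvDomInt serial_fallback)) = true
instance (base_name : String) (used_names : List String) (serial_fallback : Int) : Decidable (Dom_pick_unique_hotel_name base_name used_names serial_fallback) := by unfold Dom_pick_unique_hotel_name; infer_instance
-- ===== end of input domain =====

-- B inverts A's search: instead of probing tag-2, tag-3, … one by one against the set,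
-- it scans used_names once, parses out the suffix numbers already taken for this tag,
-- sorts them and takes the smallest free number ≥ 2 by a gap scan (alternative algorithm).
-- Python A and B both add the chosen casefolded key to used_names (same mutation);
-- the equivalence proved here is about the RETURN value. On the ASCII domain
-- str.casefold == str.lower, ported as PySem.Str.lower. A's unbounded 'while True'
-- always terminates within used_names.length + 1 iterations; the port carries that
-- number as fuel, a totality guard only.

-- ===== PORT A =====
def normalize_name (value : String) : String :=
  PySem.Str.join " " (PySem.Str.split₀ (PySem.Str.strip value))

def pickLoopA (nb : String) (sf : Int) (used : List String) (suffix : Int) : Nat → String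
  | 0 => ""   -- never reached for fuel = used.length + 1 (a free suffix exists below that bound)
  | n + 1 =>
    let candidate := nb ++ "-" ++ PySem.Int.toStr sf ++ "-" ++ PySem.Int.toStr suffix
    if used.contains (PySem.Str.lower candidate) then
      pickLoopA nb sf used (suffix + 1) n
    else candidate

def pick_unique_hotel_name (base_name : String) (used_names : List String) (serial_fallback : Int) : String :=
  let normalized_base := normalize_name base_name
  let candidate := normalized_base
  if candidate ≠ "" ∧ ¬ used_names.contains (PySem.Str.lower candidate) then candidate
  else
    let candidate2 := normalized_base ++ "-" ++ PySem.Int.toStr serial_fallback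
    if ¬ used_names.contains (PySem.Str.lower candidate2) then candidate2
    else pickLoopA normalized_base serial_fallback used_names 2 (used_names.length + 1)

-- ===== PORT B =====
-- value = 0; for ch in rest: value = value*10 + ord(ch) - 48
def hornerVal (cs : List Char) : Int :=
  cs.foldl (fun v c => v * 10 + (c.toNat : Int) - 48) 0

-- one scan over used_names collecting the suffix numbers already taken for this prefix
def collectTaken (pre : String) (used : List String) : PySem.Set Int :=
  used.foldl (fun acc name =>
    if PySem.Str.startswith name pre then
      let value := hornerVal (PySem.Str.slice name (some (PySem.Str.len pre)) none).toList
      if name = pre ++ PySem.Int.toStr value then PySem.Set.add acc value else acc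
    else acc) PySem.Set.empty

-- k = 2; for t in sorted(taken): if t == k: k += 1; elif t > k: break
def gapScan (k : Int) : List Int → Int
  | [] => k
  | t :: ts => if t = k then gapScan (k + 1) ts else if k < t then k else gapScan k ts

def pick_unique_hotel_name_alt (base_name : String) (used_names : List String) (serial_fallback : Int) : String :=
  let base := PySem.Str.join " " (PySem.Str.split₀ (PySem.Str.strip base_name))
  if base ≠ "" ∧ ¬ used_names.contains (PySem.Str.lower base) then base
  else
    let tag := base ++ "-" ++ PySem.Int.toStr serial_fallback
    if ¬ used_names.contains (PySem.Str.lower tag) then tag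
    else
      let pre := PySem.Str.lower tag ++ "-"
      let taken := collectTaken pre used_names
      let k := gapScan 2 (PySem.List.sorted taken (fun x => x) false)
      tag ++ "-" ++ PySem.Int.toStr k

-- ===== PRECONDITION & SPEC =====
def Spec_pick_unique_hotel_name (base_name : String) (used_names : List String) (serial_fallback : Int) (out : String) : Prop := out = pick_unique_hotel_name_alt base_name used_names serial_fallback
instance (base_name : String) (used_names : List String) (serial_fallback : Int) (out : String) : Decidable (Spec_pick_unique_hotel_name base_name used_names serial_fallback out) := by unfold Spec_pick_unique_hotel_name; infer_instance

-- ===== CLAIM (what is proved, stated in full; the proofs are below) =====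
def Claim_equal_pick_unique_hotel_name : Prop := ∀ (base_name : String) (used_names : List String) (serial_fallback : Int), Dom_pick_unique_hotel_name base_name used_names serial_fallback → Spec_pick_unique_hotel_name base_name used_names serial_fallback (pick_unique_hotel_name base_name used_names serial_fallback)

-- ===== LEMMAS AND PROOFS =====

-- the canonical decimal digits of n (spec for Nat.toDigits 10)
def myDigits (n : Nat) : List Char :=
  if n < 10 then [Nat.digitChar n]
  else myDigits (n / 10) ++ [Nat.digitChar (n % 10)]
decreasing_by exact Nat.div_lt_self (by omega) (by omega)

lemma digitChar_toNat {d : Nat} (h : d < 10) : (Nat.digitChar d).toNat = 48 + d := by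
  interval_cases d <;> decide

lemma lowerChar_digitChar {d : Nat} (h : d < 10) :
    PySem.Chars.lowerChar (Nat.digitChar d) = Nat.digitChar d := by
  interval_cases d <;> decide

lemma toDigitsCore_eq : ∀ (f n : Nat) (l : List Char), n < f →
    Nat.toDigitsCore 10 f n l = myDigits n ++ l := by
  intro f
  induction f with
  | zero => intro n l h; omega
  | succ f ih =>
    intro n l h
    by_cases h10 : n < 10
    · have hdiv : n / 10 = 0 := Nat.div_eq_of_lt h10
      have hmod : n % 10 = n := Nat.mod_eq_of_lt h10
      simp [Nat.toDigitsCore, hdiv, hmod, myDigits, h10]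
    · have hdiv : n / 10 ≠ 0 := by omega
      have hlt : n / 10 < f := by omega
      rw [show Nat.toDigitsCore 10 (f + 1) n l
          = Nat.toDigitsCore 10 f (n / 10) ((n % 10).digitChar :: l) by
        simp [Nat.toDigitsCore, hdiv]]
      rw [ih _ _ hlt]
      conv_rhs => rw [myDigits]
      rw [if_neg h10]
      simp

lemma toChars_eq_myDigits (v : Int) (h : 0 ≤ v) :
    PySem.Int.toChars v = myDigits v.toNat := by
  unfold PySem.Int.toChars
  rw [if_neg (by omega)]
  unfold Nat.toDigits
  rw [toDigitsCore_eq _ _ _ (by omega), List.append_nil]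

lemma horner_myDigits : ∀ n : Nat, hornerVal (myDigits n) = (n : Int) := by
  intro n
  induction n using Nat.strong_induction_on with
  | _ n ih =>
    rw [myDigits]
    by_cases h10 : n < 10
    · simp only [if_pos h10, hornerVal, List.foldl]
      rw [digitChar_toNat h10]; omega
    · rw [if_neg h10]
      simp only [hornerVal, List.foldl_append, List.foldl]
      have hrec := ih (n / 10) (Nat.div_lt_self (by omega) (by omega))
      simp only [hornerVal] at hrec
      rw [hrec, digitChar_toNat (show n % 10 < 10 by omega)]
      have hdm := Nat.div_add_mod n 10
      push_cast
      omega

lemma lower_myDigits : ∀ n : Nat, (myDigits n).map PySem.Chars.lowerChar = myDigits n := by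
  intro n
  induction n using Nat.strong_induction_on with
  | _ n ih =>
    rw [myDigits]
    by_cases h10 : n < 10
    · simp [if_pos h10, lowerChar_digitChar h10]
    · rw [if_neg h10]
      simp [List.map_append, ih (n / 10) (Nat.div_lt_self (by omega) (by omega)),
        lowerChar_digitChar (show n % 10 < 10 by omega)]

lemma horner_toChars (v : Int) (h : 0 ≤ v) : hornerVal (PySem.Int.toChars v) = v := by
  rw [toChars_eq_myDigits v h, horner_myDigits, Int.toNat_of_nonneg h]

lemma lower_append_cand (tag : String) (j : Int) (hj : 0 ≤ j) :
    PySem.Str.lower (tag ++ "-" ++ PySem.Int.toStr j)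
      = PySem.Str.lower tag ++ "-" ++ PySem.Int.toStr j := by
  rw [← String.toList_inj]
  simp only [String.toList_append, PySem.Str.toList_lower, PySem.Chars.lower,
    List.map_append, PySem.Int.toList_toStr]
  rw [toChars_eq_myDigits j hj, lower_myDigits]
  simp
  decide

lemma slice_drop_pre (pre rest : String) :
    (PySem.Str.slice (pre ++ rest) (some (PySem.Str.len pre)) none).toList = rest.toList := by
  simp only [PySem.Str.toList_slice, PySem.Chars.slice_eq_listSlice, String.toList_append]
  have hlen : PySem.Str.len pre = ((pre.toList.length : Nat) : Int) := by
    simp [PySem.Str.len_eq]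
  rw [hlen, PySem.List.slice_from_natCast, List.drop_left]

lemma startswith_pre (pre rest : String) :
    PySem.Str.startswith (pre ++ rest) pre = true := by
  rw [PySem.Str.startswith_eq]
  rw [PySem.Chars.startswith_iff]
  rw [String.toList_append]
  exact List.prefix_append _ _

-- membership in the collecting fold
lemma collect_aux (pre : String) : ∀ (used : List String) (acc : PySem.Set Int) (v : Int),
    v ∈ used.foldl (fun acc name =>
        if PySem.Str.startswith name pre then
          let value := hornerVal (PySem.Str.slice name (some (PySem.Str.len pre)) none).toList
          if name = pre ++ PySem.Int.toStr value then PySem.Set.add acc value else acc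
        else acc) acc ↔
      v ∈ acc ∨ ∃ name ∈ used, PySem.Str.startswith name pre = true ∧
        name = pre ++ PySem.Int.toStr (hornerVal (PySem.Str.slice name (some (PySem.Str.len pre)) none).toList) ∧
        hornerVal (PySem.Str.slice name (some (PySem.Str.len pre)) none).toList = v := by
  intro used
  induction used with
  | nil => intro acc v; simp
  | cons name rest ih =>
    intro acc v
    rw [List.foldl_cons, ih]
    by_cases h1 : PySem.Str.startswith name pre
    · by_cases h2 : name = pre ++ PySem.Int.toStr
          (hornerVal (PySem.Str.slice name (some (PySem.Str.len pre)) none).toList)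
      · simp only [h1, if_true, if_pos h2, PySem.Set.mem_add]
        constructor
        · rintro ((hv | hv) | ⟨nm, hnm, ha, hb, hc⟩)
          · exact Or.inl hv
          · exact Or.inr ⟨name, List.mem_cons_self, h1, h2, hv.symm⟩
          · exact Or.inr ⟨nm, List.mem_cons_of_mem _ hnm, ha, hb, hc⟩
        · rintro (hv | ⟨nm, hnm, ha, hb, hc⟩)
          · exact Or.inl (Or.inl hv)
          · rcases List.mem_cons.1 hnm with heq | hnm'
            · subst heq
              exact Or.inl (Or.inr hc.symm)
            · exact Or.inr ⟨nm, hnm', ha, hb, hc⟩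
      · simp only [h1, if_true, if_neg h2]
        constructor
        · rintro (hv | ⟨nm, hnm, ha, hb, hc⟩)
          · exact Or.inl hv
          · exact Or.inr ⟨nm, List.mem_cons_of_mem _ hnm, ha, hb, hc⟩
        · rintro (hv | ⟨nm, hnm, ha, hb, hc⟩)
          · exact Or.inl hv
          · rcases List.mem_cons.1 hnm with heq | hnm'
            · subst heq; exact absurd hb h2
            · exact Or.inr ⟨nm, hnm', ha, hb, hc⟩
    · simp only [h1, Bool.false_eq_true, if_false]
      constructor
      · rintro (hv | ⟨nm, hnm, ha, hb, hc⟩)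
        · exact Or.inl hv
        · exact Or.inr ⟨nm, List.mem_cons_of_mem _ hnm, ha, hb, hc⟩
      · rintro (hv | ⟨nm, hnm, ha, hb, hc⟩)
        · exact Or.inl hv
        · rcases List.mem_cons.1 hnm with heq | hnm'
          · subst heq; exact absurd ha (by simpa using h1)
          · exact Or.inr ⟨nm, hnm', ha, hb, hc⟩

lemma nodup_setAdd {s : PySem.Set Int} (h : s.Nodup) (x : Int) :
    (PySem.Set.add s x).Nodup := by
  unfold PySem.Set.add
  split_ifs with hc
  · exact h
  · have hx : x ∉ s := by simpa using hc
    simp only [List.nodup_append, List.nodup_singleton, true_and]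
    refine ⟨h, ?_⟩
    intro a ha b hb heq
    rw [List.mem_singleton] at hb
    subst hb; subst heq
    exact hx ha

lemma length_setAdd (s : PySem.Set Int) (x : Int) :
    (PySem.Set.add s x).length ≤ s.length + 1 := by
  unfold PySem.Set.add
  split_ifs
  · omega
  · simp

lemma nodup_collectTaken (pre : String) (used : List String) :
    (collectTaken pre used).Nodup := by
  unfold collectTaken
  suffices h : ∀ (used : List String) (acc : PySem.Set Int), acc.Nodup →
      (used.foldl (fun acc name =>
        if PySem.Str.startswith name pre then
          let value := hornerVal (PySem.Str.slice name (some (PySem.Str.len pre)) none).toList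
          if name = pre ++ PySem.Int.toStr value then PySem.Set.add acc value else acc
        else acc) acc).Nodup by
    exact h used PySem.Set.empty List.nodup_nil
  intro used'
  induction used' with
  | nil => intro acc h; simpa using h
  | cons name rest ih =>
    intro acc h
    rw [List.foldl_cons]
    apply ih
    by_cases h1 : PySem.Str.startswith name pre
    · by_cases h2 : name = pre ++ PySem.Int.toStr
          (hornerVal (PySem.Str.slice name (some (PySem.Str.len pre)) none).toList)
      · simpa only [h1, if_true, if_pos h2] using nodup_setAdd h _
      · simpa only [h1, if_true, if_neg h2] using h
    · simpa only [h1, Bool.false_eq_true, if_false] using h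

lemma length_collectTaken (pre : String) (used : List String) :
    (collectTaken pre used).length ≤ used.length := by
  unfold collectTaken
  suffices h : ∀ (used : List String) (acc : PySem.Set Int),
      (used.foldl (fun acc name =>
        if PySem.Str.startswith name pre then
          let value := hornerVal (PySem.Str.slice name (some (PySem.Str.len pre)) none).toList
          if name = pre ++ PySem.Int.toStr value then PySem.Set.add acc value else acc
        else acc) acc).length ≤ acc.length + used.length by
    simpa using h used PySem.Set.empty
  intro used'
  induction used' with
  | nil => intro acc; simp
  | cons name rest ih =>
    intro acc
    rw [List.foldl_cons, List.length_cons]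
    have hstep := ih (if PySem.Str.startswith name pre then
        (let value := hornerVal (PySem.Str.slice name (some (PySem.Str.len pre)) none).toList
        if name = pre ++ PySem.Int.toStr value then PySem.Set.add acc value else acc)
      else acc)
    refine le_trans hstep ?_
    have hone : (if PySem.Str.startswith name pre then
        (let value := hornerVal (PySem.Str.slice name (some (PySem.Str.len pre)) none).toList
        if name = pre ++ PySem.Int.toStr value then PySem.Set.add acc value else acc)
      else acc).length ≤ acc.length + 1 := by
      by_cases h1 : PySem.Str.startswith name pre
      · by_cases h2 : name = pre ++ PySem.Int.toStr
            (hornerVal (PySem.Str.slice name (some (PySem.Str.len pre)) none).toList)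
        · simpa only [h1, if_true, if_pos h2] using length_setAdd acc _
        · simp only [h1, if_true, if_neg h2]; omega
      · simp only [h1, Bool.false_eq_true, if_false]; omega
    omega

-- the two directions of the bridge between A's membership tests and B's taken set
lemma collect_subset (pre : String) (used : List String) (v : Int)
    (h : v ∈ collectTaken pre used) : (pre ++ PySem.Int.toStr v) ∈ used := by
  rcases (collect_aux pre used PySem.Set.empty v).1 h with hv | ⟨name, hmem, _, heq, hval⟩
  · simp [PySem.Set.empty] at hv
  · rw [hval] at heq
    rw [← heq]; exact hmem

lemma collect_complete (pre : String) (used : List String) (v : Int) (hv : 0 ≤ v)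
    (h : (pre ++ PySem.Int.toStr v) ∈ used) : v ∈ collectTaken pre used := by
  apply (collect_aux pre used PySem.Set.empty v).2
  refine Or.inr ⟨pre ++ PySem.Int.toStr v, h, startswith_pre _ _, ?_, ?_⟩
  · rw [slice_drop_pre, PySem.Int.toList_toStr, horner_toChars v hv]
  · rw [slice_drop_pre, PySem.Int.toList_toStr, horner_toChars v hv]

-- gap-scan properties on a strictly sorted list
lemma gapScan_spec : ∀ (ts : List Int) (k : Int), ts.Pairwise (· < ·) →
    k ≤ gapScan k ts ∧ gapScan k ts ∉ ts ∧
      (∀ j, k ≤ j → j < gapScan k ts → j ∈ ts) := by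
  intro ts
  induction ts with
  | nil =>
    intro k _
    refine ⟨le_refl _, by simp [gapScan], ?_⟩
    intro j h1 h2
    simp only [gapScan] at h2
    omega
  | cons t ts ih =>
    intro k hp
    have hp' : ts.Pairwise (· < ·) := hp.tail
    have hlt : ∀ x ∈ ts, t < x := fun x hx => List.rel_of_pairwise_cons hp hx
    by_cases h1 : t = k
    · obtain ⟨ha, hb, hc⟩ := ih (k + 1) hp'
      simp only [gapScan, if_pos h1]
      refine ⟨by omega, ?_, ?_⟩
      · intro hmem
        rcases List.mem_cons.1 hmem with h | h
        · omega
        · exact hb h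
      · intro j hj1 hj2
        by_cases hjk : j = k
        · subst hjk; rw [← h1]; exact List.mem_cons_self ..
        · exact List.mem_cons_of_mem _ (hc j (by omega) hj2)
    · by_cases h2 : k < t
      · simp only [gapScan, if_neg h1, if_pos h2]
        refine ⟨le_refl _, ?_, by intro j hj1 hj2; omega⟩
        intro hmem
        rcases List.mem_cons.1 hmem with h | h
        · omega
        · have := hlt _ h; omega
      · obtain ⟨ha, hb, hc⟩ := ih k hp'
        simp only [gapScan, if_neg h1, if_neg h2]
        refine ⟨ha, ?_, ?_⟩
        · intro hmem
          rcases List.mem_cons.1 hmem with h | h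
          · omega
          · exact hb h
        · intro j hj1 hj2
          exact List.mem_cons_of_mem _ (hc j hj1 hj2)

lemma gapScan_le : ∀ (ts : List Int) (k : Int), gapScan k ts ≤ k + ts.length := by
  intro ts
  induction ts with
  | nil => intro k; simp [gapScan]
  | cons t ts ih =>
    intro k
    simp only [gapScan, List.length_cons]
    split_ifs with h1 h2
    · have := ih (k + 1); push_cast; push_cast at this; omega
    · push_cast; omega
    · have := ih k; push_cast; push_cast at this; omega

-- A's probing loop lands on the least free suffix
lemma pickLoopA_eq (nb : String) (sf : Int) (used : List String) (k0 : Int)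
    (hfree : used.contains (PySem.Str.lower (nb ++ "-" ++ PySem.Int.toStr sf ++ "-" ++ PySem.Int.toStr k0)) = false)
    (htaken : ∀ j : Int, 2 ≤ j → j < k0 →
      used.contains (PySem.Str.lower (nb ++ "-" ++ PySem.Int.toStr sf ++ "-" ++ PySem.Int.toStr j)) = true) :
    ∀ (n : Nat) (start : Int), 2 ≤ start → start ≤ k0 → k0 < start + n →
      pickLoopA nb sf used start n
        = nb ++ "-" ++ PySem.Int.toStr sf ++ "-" ++ PySem.Int.toStr k0 := by
  intro n
  induction n with
  | zero => intro start _ _ h; simp only [Nat.cast_zero, add_zero] at h; omega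
  | succ n ih =>
    intro start h2 hle hlt
    by_cases hek : start = k0
    · subst hek
      have hfree2 : PySem.Str.lower (nb ++ "-" ++ PySem.Int.toStr sf ++ "-" ++ PySem.Int.toStr start)
          ∉ used := by simpa using hfree
      simp [pickLoopA, hfree2]
    · have h1 := htaken start h2 (by omega)
      simp only [pickLoopA, h1, if_true]
      exact ih (start + 1) (by omega) (by omega) (by push_cast at hlt ⊢; omega)

-- ===== VERDICT (by name: the statement is the Claim_ definition above) =====
theorem pick_unique_hotel_name_spec : Claim_equal_pick_unique_hotel_name := by
  intro base_name used_names serial_fallback _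
  unfold Spec_pick_unique_hotel_name pick_unique_hotel_name pick_unique_hotel_name_alt normalize_name
  set nb := PySem.Str.join " " (PySem.Str.split₀ (PySem.Str.strip base_name)) with hnb
  by_cases c1 : nb ≠ "" ∧ ¬ used_names.contains (PySem.Str.lower nb)
  · rw [if_pos c1, if_pos c1]
  · rw [if_neg c1, if_neg c1]
    set tag := nb ++ "-" ++ PySem.Int.toStr serial_fallback with htag
    by_cases c2 : ¬ used_names.contains (PySem.Str.lower tag)
    · rw [if_pos c2, if_pos c2]
    · rw [if_neg c2, if_neg c2]
      set pre := PySem.Str.lower tag ++ "-" with hpre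
      set taken := collectTaken pre used_names with htkn
      set ts := PySem.List.sorted taken (fun x => x) false with hts
      set k0 := gapScan 2 ts with hk0
      have hperm : ts.Perm taken := PySem.List.sorted_perm taken (fun x => x) false
      have hnd : ts.Nodup := hperm.nodup_iff.2 (nodup_collectTaken pre used_names)
      have hpw : ts.Pairwise (· < ·) := by
        have hle : ts.Pairwise (fun a b => a ≤ b) :=
          PySem.List.sorted_pairwise taken (fun x => x)
        exact List.Pairwise.imp₂ (fun a b h1 h2 => lt_of_le_of_ne h1 h2) hle hnd
      obtain ⟨hge2, hfree, hfull⟩ := gapScan_spec ts 2 hpw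
      rw [← hk0] at hge2 hfree hfull
      have hcand : ∀ j : Int, 0 ≤ j →
          PySem.Str.lower (tag ++ "-" ++ PySem.Int.toStr j) = pre ++ PySem.Int.toStr j := by
        intro j hj
        rw [lower_append_cand tag j hj, hpre]
      have hfree' : used_names.contains
          (PySem.Str.lower (tag ++ "-" ++ PySem.Int.toStr k0)) = false := by
        rw [hcand k0 (by omega)]
        have hnm : (pre ++ PySem.Int.toStr k0) ∉ used_names := by
          intro hmem
          exact hfree (hperm.mem_iff.2 (collect_complete pre used_names k0 (by omega) hmem))
        simpa using hnm
      have htk : ∀ j : Int, 2 ≤ j → j < k0 →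
          used_names.contains (PySem.Str.lower (tag ++ "-" ++ PySem.Int.toStr j)) = true := by
        intro j hj1 hj2
        rw [hcand j (by omega)]
        have hj3 : j ∈ taken := hperm.mem_iff.1 (hfull j hj1 hj2)
        simpa using collect_subset pre used_names j hj3
      rw [htag] at hfree' htk
      have hbound : k0 < 2 + ((used_names.length : Int) + 1) := by
        have h1 := gapScan_le ts 2
        rw [← hk0] at h1
        have h2 : ts.length = taken.length := hperm.length_eq
        have h3 := length_collectTaken pre used_names
        rw [← htkn] at h3
        omega
      rw [pickLoopA_eq nb serial_fallback used_names k0 hfree' htk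
        (used_names.length + 1) 2 (by omega) (by omega) (by push_cast; omega)]
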